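-- pv_equiv track=rewrite | github.com/yberreby/CanViT-MLX | canvit_mlx.py | compute_rw_positions
-- ===== SOURCE A (Python) =====
-- def compute_rw_positions(n_blocks: int, rw_stride: int) -> tuple[list[int], list[int]]:
--     rw_positions = list(range(rw_stride - 1, n_blocks, rw_stride))
--     read_after = []
--     write_after = []
--     for i, pos in enumerate(rw_positions):
--         if i % 2 == 0:
--             read_after.append(pos)
--         else:
--             write_after.append(pos)
--     last_block = n_blocks - 1
--     if not write_after or write_after[-1] != last_block:
--         write_after.append(last_block)
--     return read_after, write_after
-- ===== SOURCE B (Python) =====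
-- def compute_rw_positions(n_blocks: int, rw_stride: int) -> tuple[list[int], list[int]]:
--     # Even-index positions rw_stride-1 + 2k*rw_stride form one arithmetic range,
--     # odd-index positions 2*rw_stride-1 + 2k*rw_stride the other.
--     read_after = list(range(rw_stride - 1, n_blocks, 2 * rw_stride))
--     write_after = list(range(2 * rw_stride - 1, n_blocks, 2 * rw_stride))
--     if not write_after or write_after[-1] != n_blocks - 1:
--         write_after.append(n_blocks - 1)
--     return read_after, write_after
-- ===== Notes on version B (the rewrite author's own statement) =====
-- stated objective: simpler
-- what changed: Replaces the combined strided position list and the enumerate loop that splits it by index parity with two direct arithmetic ranges of step 2*rw_stride (even-index positions start at rw_stride-1, odd-index ones at 2*rw_stride-1), keeping the trailing last-block append.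
import Mathlib
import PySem

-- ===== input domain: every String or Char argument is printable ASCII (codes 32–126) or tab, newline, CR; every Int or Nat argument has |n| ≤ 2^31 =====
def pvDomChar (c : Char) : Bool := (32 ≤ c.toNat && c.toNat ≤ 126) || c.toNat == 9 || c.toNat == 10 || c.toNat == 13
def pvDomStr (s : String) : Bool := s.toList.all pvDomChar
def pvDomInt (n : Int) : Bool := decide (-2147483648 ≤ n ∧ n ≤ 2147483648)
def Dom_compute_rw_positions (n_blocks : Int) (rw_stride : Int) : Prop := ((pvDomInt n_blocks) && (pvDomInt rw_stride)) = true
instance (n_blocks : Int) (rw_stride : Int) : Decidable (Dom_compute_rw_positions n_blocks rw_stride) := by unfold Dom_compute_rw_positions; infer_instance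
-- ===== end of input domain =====

-- B replaces the index-parity split of one strided range by two direct ranges of step 2*rw_stride (simpler).

-- ===== PORT A =====
def compute_rw_positions (n_blocks : Int) (rw_stride : Int) : List Int × List Int :=
  let rw_positions := PySem.List.pyRange (rw_stride - 1) n_blocks rw_stride
  let p := (PySem.List.enumerate rw_positions).foldl
      (fun (acc : List Int × List Int) (ip : Int × Int) =>
        if PySem.Int.mod ip.1 2 = 0 then (acc.1 ++ [ip.2], acc.2) else (acc.1, acc.2 ++ [ip.2]))
      ([], [])
  let last_block := n_blocks - 1
  let write_after :=
    if p.2 = [] ∨ PySem.List.pyGet? p.2 (-1) ≠ some last_block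
    then p.2 ++ [last_block] else p.2
  (p.1, write_after)

-- ===== PORT B =====
def compute_rw_positions_alt (n_blocks : Int) (rw_stride : Int) : List Int × List Int :=
  let read_after := PySem.List.pyRange (rw_stride - 1) n_blocks (2 * rw_stride)
  let write_after := PySem.List.pyRange (2 * rw_stride - 1) n_blocks (2 * rw_stride)
  let write_after' :=
    if write_after = [] ∨ PySem.List.pyGet? write_after (-1) ≠ some (n_blocks - 1)
    then write_after ++ [n_blocks - 1] else write_after
  (read_after, write_after')

-- ===== PRECONDITION & SPEC =====
-- Pre_ excludes exactly rw_stride = 0, where both Pythons raise ValueError (range step 0).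
def Pre_compute_rw_positions (n_blocks : Int) (rw_stride : Int) : Prop := rw_stride ≠ 0
instance (n_blocks : Int) (rw_stride : Int) : Decidable (Pre_compute_rw_positions n_blocks rw_stride) := by unfold Pre_compute_rw_positions; infer_instance
def pvWitness_compute_rw_positions : Int × Int := (10, 2)

def Spec_compute_rw_positions (n_blocks : Int) (rw_stride : Int) (out : List Int × List Int) : Prop := out = compute_rw_positions_alt n_blocks rw_stride
instance (n_blocks : Int) (rw_stride : Int) (out : List Int × List Int) : Decidable (Spec_compute_rw_positions n_blocks rw_stride out) := by unfold Spec_compute_rw_positions; infer_instance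

-- ===== CLAIM (what is proved, stated in full; the proofs are below) =====
def Claim_equal_compute_rw_positions : Prop := ∀ (n_blocks : Int) (rw_stride : Int), Dom_compute_rw_positions n_blocks rw_stride → Pre_compute_rw_positions n_blocks rw_stride → Spec_compute_rw_positions n_blocks rw_stride (compute_rw_positions n_blocks rw_stride)

-- ===== LEMMAS AND PROOFS =====

-- split a list into its even- and odd-indexed elements
def pvSplit2 {α : Type} : List α → List α × List α
  | [] => ([], [])
  | x :: xs => (x :: (pvSplit2 xs).2, (pvSplit2 xs).1)

-- A's enumerate loop computes exactly the even/odd split (accumulator-generalized)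
lemma pv_fold_enum (xs : List Int) : ∀ (i : Int) (r w : List Int),
    (PySem.List.enumerate xs i).foldl
      (fun (acc : List Int × List Int) (ip : Int × Int) =>
        if PySem.Int.mod ip.1 2 = 0 then (acc.1 ++ [ip.2], acc.2) else (acc.1, acc.2 ++ [ip.2]))
      (r, w)
    = if PySem.Int.mod i 2 = 0
      then (r ++ (pvSplit2 xs).1, w ++ (pvSplit2 xs).2)
      else (r ++ (pvSplit2 xs).2, w ++ (pvSplit2 xs).1) := by
  induction xs with
  | nil => intro i r w; simp [PySem.List.enumerate_nil, pvSplit2]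
  | cons x xs ih =>
    intro i r w
    rw [PySem.List.enumerate_cons]
    simp only [List.foldl_cons]
    have hmi : PySem.Int.mod i 2 = i % 2 := by simp [PySem.Int.mod, Int.fmod_eq_emod]
    have hmi1 : PySem.Int.mod (i + 1) 2 = (i + 1) % 2 := by
      simp [PySem.Int.mod, Int.fmod_eq_emod]
    by_cases h : PySem.Int.mod i 2 = 0
    · have h1 : ¬ PySem.Int.mod (i + 1) 2 = 0 := by rw [hmi1]; rw [hmi] at h; omega
      rw [if_pos h, if_pos h, ih (i + 1) (r ++ [x]) w, if_neg h1]
      simp [pvSplit2]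
    · have h1 : PySem.Int.mod (i + 1) 2 = 0 := by rw [hmi1]; rw [hmi] at h; omega
      rw [if_neg h, if_neg h, ih (i + 1) r (w ++ [x]), if_pos h1]
      simp [pvSplit2]

lemma pv_pyRange_nil (a b s : Int) (h1 : 0 < s → b ≤ a) (h2 : s < 0 → a ≤ b) :
    PySem.List.pyRange a b s = [] := by
  unfold PySem.List.pyRange
  split_ifs <;> simp_all <;> omega

-- ceil-count of a strided range decreases by one per element
lemma pv_count (s x : Int) (hs : 0 < s) (hx : 0 < x) :
    ((x + s - 1) / s).toNat = (if 0 < x - s then ((x - s + s - 1) / s).toNat else 0) + 1 := by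
  have hxe : x + s - 1 = (x - 1) + 1 * s := by ring
  rw [hxe, Int.add_mul_ediv_right _ _ (ne_of_gt hs)]
  have h0 : 0 ≤ (x - 1) / s := Int.ediv_nonneg (by omega) (le_of_lt hs)
  split_ifs with h
  · have hxe2 : x - s + s - 1 = x - 1 := by ring
    rw [hxe2]; omega
  · have : (x - 1) / s = 0 := Int.ediv_eq_zero_of_lt (by omega) (by omega)
    omega

lemma pv_map_range_cons (a s : Int) (n m : Nat) (h : n = m + 1) :
    (List.range n).map (fun (k : Nat) => a + s * (k : Int))
      = a :: (List.range m).map (fun (k : Nat) => (a + s) + s * (k : Int)) := by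
  subst h
  rw [List.range_succ_eq_map, List.map_cons, List.map_map]
  congr 1
  · simp
  · apply List.map_congr_left; intro k _
    simp [Nat.succ_eq_add_one]; ring

-- range(a, b, s) with s < 0, unfolded (the negative-step branch of the definition)
lemma pv_pyRange_of_neg (a b s : Int) (hs : s < 0) :
    PySem.List.pyRange a b s
      = (List.range (if b < a then ((a - b + -s - 1) / -s).toNat else 0)).map
          (fun (k : Nat) => a + s * (k : Int)) := by
  unfold PySem.List.pyRange
  rw [if_neg (by omega : ¬ s = 0), if_neg (by omega : ¬ 0 < s)]

lemma pv_pyRange_cons (a b s : Int) (h : (0 < s ∧ a < b) ∨ (s < 0 ∧ b < a)) :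
    PySem.List.pyRange a b s = a :: PySem.List.pyRange (a + s) b s := by
  rcases h with ⟨hs, hab⟩ | ⟨hs, hab⟩
  · rw [PySem.List.pyRange_of_pos a b hs, PySem.List.pyRange_of_pos (a + s) b hs]
    apply pv_map_range_cons
    rw [if_pos hab]
    have hc := pv_count s (b - a) hs (by omega)
    have he1 : b - a + s - 1 = (b - a) + s - 1 := by ring
    rw [he1, hc]
    have he2 : b - (a + s) + s - 1 = (b - a) - s + s - 1 := by ring
    rw [he2]
    generalize ((b - a) - s + s - 1) / s = q
    split_ifs <;> omega
  · rw [pv_pyRange_of_neg a b s hs, pv_pyRange_of_neg (a + s) b s hs]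
    apply pv_map_range_cons
    rw [if_pos hab]
    have ht : 0 < -s := by omega
    have hc := pv_count (-s) (a - b) ht (by omega)
    have he1 : a - b + -s - 1 = (a - b) + -s - 1 := by ring
    rw [he1, hc]
    have he2 : a + s - b + -s - 1 = (a - b) - -s + -s - 1 := by ring
    rw [he2]
    generalize ((a - b) - -s + -s - 1) / -s = q
    split_ifs <;> omega

-- the even-index elements of range(a,b,s) are range(a,b,2s), the odd ones range(a+s,b,2s)
lemma pv_split_pyRange (b s : Int) (hs : s ≠ 0) : ∀ (n : Nat) (a : Int),
    (PySem.List.pyRange a b s).length = n →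
    pvSplit2 (PySem.List.pyRange a b s)
      = (PySem.List.pyRange a b (2 * s), PySem.List.pyRange (a + s) b (2 * s)) := by
  intro n
  induction n with
  | zero =>
    intro a h
    have hnil : PySem.List.pyRange a b s = [] := List.eq_nil_of_length_eq_zero h
    have hcond : ¬ ((0 < s ∧ a < b) ∨ (s < 0 ∧ b < a)) := by
      intro hc
      rw [pv_pyRange_cons a b s hc] at hnil
      exact List.cons_ne_nil _ _ hnil
    rw [hnil]
    have h1 : PySem.List.pyRange a b (2 * s) = [] :=
      pv_pyRange_nil _ _ _ (by omega) (by omega)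
    have h2 : PySem.List.pyRange (a + s) b (2 * s) = [] :=
      pv_pyRange_nil _ _ _ (by omega) (by omega)
    simp [pvSplit2, h1, h2]
  | succ n ih =>
    intro a h
    by_cases hc : (0 < s ∧ a < b) ∨ (s < 0 ∧ b < a)
    · rw [pv_pyRange_cons a b s hc] at h ⊢
      have hlen : (PySem.List.pyRange (a + s) b s).length = n := by simpa using h
      have hih := ih (a + s) hlen
      simp only [pvSplit2, hih]
      rw [pv_pyRange_cons a b (2 * s) (by omega)]
      have he : a + 2 * s = a + s + s := by ring
      rw [he]
    · exfalso
      have hnil : PySem.List.pyRange a b s = [] :=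
        pv_pyRange_nil _ _ _ (by omega) (by omega)
      rw [hnil] at h
      simp at h

-- ===== VERDICT (by name: the statement is the Claim_ definition above) =====
theorem compute_rw_positions_spec : Claim_equal_compute_rw_positions := by
  intro n_blocks rw_stride _ hpre
  unfold Spec_compute_rw_positions compute_rw_positions compute_rw_positions_alt
  have hfold := pv_fold_enum (PySem.List.pyRange (rw_stride - 1) n_blocks rw_stride) 0 [] []
  have h0 : PySem.Int.mod 0 2 = 0 := by decide
  rw [h0, if_pos rfl] at hfold
  simp only [List.nil_append] at hfold
  have hsplit := pv_split_pyRange n_blocks rw_stride hpre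
    (PySem.List.pyRange (rw_stride - 1) n_blocks rw_stride).length (rw_stride - 1) rfl
  have he : rw_stride - 1 + rw_stride = 2 * rw_stride - 1 := by ring
  rw [he] at hsplit
  simp only [hfold, hsplit]
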